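-- pv_equiv track=rewrite | github.com/ducklin404/chess_engine | engine/bitboard_utils.py | build_between_line
-- ===== SOURCE A (Python) =====
-- def build_between_line(from_sq, to_sq):
--     line = 0
--     from_row, from_col = divmod(from_sq, 8)
--     to_row, to_col = divmod(to_sq, 8)
--     offset_row = to_row - from_row
--     offset_col = to_col - from_col
--     if offset_row != 0 and offset_col != 0:
--         return 0
--     if offset_row == 0:
--         step_row = 0
--         step_col = 1 if offset_col > 0 else -1
--     else:
--         step_row = 1 if offset_row > 0 else -1
--         step_col = 0
--
--     for i in range(0, max(abs(offset_row), abs(offset_col))):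
--         line |= 1 << (from_row + step_row*i)*8 + (from_col + step_col*i)
--
--     return line
-- ===== SOURCE B (Python) =====
-- def build_between_line(from_sq, to_sq):
--     from_row, from_col = divmod(from_sq, 8)
--     to_row, to_col = divmod(to_sq, 8)
--     offset_row = to_row - from_row
--     offset_col = to_col - from_col
--     if offset_row != 0 and offset_col != 0:
--         return 0
--     n = max(abs(offset_row), abs(offset_col))
--     if n == 0:
--         return 0
--     if offset_row == 0:
--         # horizontal sweep: n consecutive bits starting at the lowest swept square
--         base = from_sq if offset_col > 0 else from_sq - (n - 1)
--         return ((1 << n) - 1) << base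
--     # vertical sweep: n bits spaced 8 apart, via the geometric-series constant
--     base = from_sq if offset_row > 0 else from_sq - 8 * (n - 1)
--     return (((1 << (8 * n)) - 1) // 255) << base
-- ===== Notes on version B (the rewrite author's own statement) =====
-- stated objective: simpler
-- what changed: Replaces A's per-square loop that ORs one bit per step with a closed-form mask: n consecutive bits ((1<<n)-1) shifted to the lowest swept square for a rank sweep, and the 0x0101..01 geometric-series constant ((1<<8n)-1)//255 shifted likewise for a file sweep.
import Mathlib
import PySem

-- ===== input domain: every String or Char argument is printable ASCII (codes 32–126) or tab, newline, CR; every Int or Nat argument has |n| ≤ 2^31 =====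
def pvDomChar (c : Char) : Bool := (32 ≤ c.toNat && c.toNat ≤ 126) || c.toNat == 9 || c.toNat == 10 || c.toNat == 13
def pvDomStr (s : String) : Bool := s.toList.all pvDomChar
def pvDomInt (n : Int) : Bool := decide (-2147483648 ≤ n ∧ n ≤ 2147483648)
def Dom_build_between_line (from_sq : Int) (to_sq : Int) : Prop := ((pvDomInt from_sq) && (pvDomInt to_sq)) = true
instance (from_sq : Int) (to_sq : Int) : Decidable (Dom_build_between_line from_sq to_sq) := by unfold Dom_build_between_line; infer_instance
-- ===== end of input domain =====

-- B replaces A's bit-by-bit loop with a closed-form mask: n consecutive bits for a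
-- rank sweep, the 0x0101…01 geometric-series constant for a file sweep (objective: simpler).

-- ===== PORT A =====
-- literal port of A; '1 << e' is '1 <<< e.toNat', exact on Pre_ (there e ≥ 0; Python raises otherwise)
def build_between_line (from_sq : Int) (to_sq : Int) : Int :=
  let line : Int := 0
  let from_row := PySem.Int.floordiv from_sq 8
  let from_col := PySem.Int.mod from_sq 8
  let to_row := PySem.Int.floordiv to_sq 8
  let to_col := PySem.Int.mod to_sq 8
  let offset_row := to_row - from_row
  let offset_col := to_col - from_col
  if offset_row ≠ 0 ∧ offset_col ≠ 0 then 0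
  else
    let step_row : Int := if offset_row = 0 then 0 else (if offset_row > 0 then 1 else -1)
    let step_col : Int := if offset_row = 0 then (if offset_col > 0 then 1 else -1) else 0
    (PySem.List.pyRange 0 (max |offset_row| |offset_col|) 1).foldl
      (fun line i =>
        PySem.Int.bor line ((1 : Int) <<< ((from_row + step_row * i) * 8 + (from_col + step_col * i)).toNat))
      line

-- ===== PORT B =====
-- literal port of Source B; shifts are exact on Pre_ (n ≥ 0 always, base ≥ 0 on Pre_; Python raises otherwise)
def build_between_line_alt (from_sq : Int) (to_sq : Int) : Int :=
  let from_row := PySem.Int.floordiv from_sq 8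
  let from_col := PySem.Int.mod from_sq 8
  let to_row := PySem.Int.floordiv to_sq 8
  let to_col := PySem.Int.mod to_sq 8
  let offset_row := to_row - from_row
  let offset_col := to_col - from_col
  if offset_row ≠ 0 ∧ offset_col ≠ 0 then 0
  else
    let n : Int := max |offset_row| |offset_col|
    if n = 0 then 0
    else if offset_row = 0 then
      -- horizontal sweep: n consecutive bits starting at the lowest swept square
      let base : Int := if offset_col > 0 then from_sq else from_sq - (n - 1)
      (((1 : Int) <<< n.toNat) - 1) <<< base.toNat
    else
      -- vertical sweep: n bits spaced 8 apart, via the geometric-series constant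
      let base : Int := if offset_row > 0 then from_sq else from_sq - 8 * (n - 1)
      (PySem.Int.floordiv (((1 : Int) <<< (8 * n).toNat) - 1) 255) <<< base.toNat

-- ===== PRECONDITION & SPEC =====
-- Pre_ excludes exactly the inputs on which A raises ValueError ('1 << negative'):
-- aligned pairs whose sweep visits a square with a negative bit index.
def Pre_build_between_line (from_sq : Int) (to_sq : Int) : Prop :=
  let from_row := PySem.Int.floordiv from_sq 8
  let from_col := PySem.Int.mod from_sq 8
  let to_row := PySem.Int.floordiv to_sq 8
  let to_col := PySem.Int.mod to_sq 8
  ¬ ((from_row = to_row ∧ from_col ≠ to_col ∧ from_sq < 0) ∨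
     (from_col = to_col ∧ from_row ≠ to_row ∧
       ((from_row < to_row ∧ from_sq < 0) ∨ (to_row < from_row ∧ to_sq < -8))))
instance (from_sq : Int) (to_sq : Int) : Decidable (Pre_build_between_line from_sq to_sq) := by
  unfold Pre_build_between_line; infer_instance

def pvWitness_build_between_line : Int × Int := (0, 3)

def Spec_build_between_line (from_sq : Int) (to_sq : Int) (out : Int) : Prop := out = build_between_line_alt from_sq to_sq
instance (from_sq : Int) (to_sq : Int) (out : Int) : Decidable (Spec_build_between_line from_sq to_sq out) := by unfold Spec_build_between_line; infer_instance

-- ===== CLAIM (what is proved, stated in full; the proofs are below) =====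
def Claim_equal_build_between_line : Prop := ∀ (from_sq : Int) (to_sq : Int), Dom_build_between_line from_sq to_sq → Pre_build_between_line from_sq to_sq → Spec_build_between_line from_sq to_sq (build_between_line from_sq to_sq)

-- ===== LEMMAS AND PROOFS =====

-- or of disjoint bit ranges is addition
theorem pvLorDisj (k : Nat) : ∀ a b : Nat, 2 ^ k ∣ a → b < 2 ^ k → a ||| b = a + b := by
  induction k with
  | zero => intro a b ha hb; interval_cases b; simp
  | succ k ih =>
      intro a b ha hb
      obtain ⟨c, rfl⟩ := ha
      have h1 : 2 ^ (k + 1) * c = Nat.bit false (2 ^ k * c) := by simp [Nat.bit]; ring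
      have h2 : b = Nat.bit (b.testBit 0) (b >>> 1) := (Nat.bit_testBit_zero_shiftRight_one b).symm
      rw [h1, h2, Nat.lor_bit]
      have hb2 : b >>> 1 < 2 ^ k := by rw [Nat.shiftRight_one]; omega
      rw [ih _ _ ⟨c, rfl⟩ hb2]
      cases hb0 : b.testBit 0 <;> simp [Nat.bit, Nat.shiftRight_one] <;>
        · have := Nat.testBit_zero b ▸ hb0
          omega

theorem pvGeomTwo (e : Nat) : ∑ x ∈ Finset.range e, 2 ^ x = 2 ^ e - 1 := by
  induction e with
  | zero => simp
  | succ e ih => rw [Finset.sum_range_succ, ih]; have : 0 < 2 ^ e := Nat.two_pow_pos e; omega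

-- sum of distinct powers of two below 2^e
theorem pvSumPowLt (e : Nat) (es : List Nat) (hp : es.Pairwise (· < ·)) (he : ∀ x ∈ es, x < e) :
    (es.map (2 ^ ·)).sum < 2 ^ e := by
  have hnd : es.Nodup := hp.nodup
  have h1 : (es.map (2 ^ ·)).sum = ∑ x ∈ es.toFinset, 2 ^ x := by
    rw [List.sum_toFinset _ hnd]
  have h2 : es.toFinset ⊆ Finset.range e := by
    intro x hx; simp only [List.mem_toFinset] at hx; exact Finset.mem_range.2 (he x hx)
  have h3 : ∑ x ∈ es.toFinset, 2 ^ x ≤ ∑ x ∈ Finset.range e, 2 ^ x :=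
    Finset.sum_le_sum_of_subset h2
  have h4 := pvGeomTwo e
  have : 0 < 2 ^ e := Nat.two_pow_pos e
  omega

-- folding '|= 1 << e' over strictly increasing exponents is the sum of the powers
theorem pvFoldBor (es : List Nat) (hp : es.Pairwise (· < ·)) :
    es.foldl (fun a e => a ||| 2 ^ e) 0 = (es.map (2 ^ ·)).sum := by
  induction es using List.reverseRecOn with
  | nil => simp
  | append_singleton es e ih =>
      rw [List.pairwise_append] at hp
      obtain ⟨hp1, -, hlt⟩ := hp
      have he : ∀ x ∈ es, x < e := fun x hx => hlt x hx e (by simp)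
      rw [List.foldl_append, ih hp1, List.foldl_cons, List.foldl_nil, Nat.lor_comm,
        pvLorDisj e _ _ ⟨1, by ring⟩ (pvSumPowLt e es hp1 he)]
      simp [Nat.add_comm]

theorem pvSumRange (m : Nat) (f : Nat → Nat) :
    ((List.range m).map f).sum = ∑ k ∈ Finset.range m, f k := by
  induction m with
  | zero => simp
  | succ m ih => simp [List.range_succ, Finset.sum_range_succ, ih]

-- ascending arithmetic exponents
theorem pvAsc (b σ m : Nat) (hσ : 0 < σ) :
    (List.range m).foldl (fun a k => a ||| 2 ^ (b + σ * k)) 0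
      = 2 ^ b * ∑ k ∈ Finset.range m, (2 ^ σ) ^ k := by
  have hmap : (List.range m).foldl (fun a k => a ||| 2 ^ (b + σ * k)) 0
      = ((List.range m).map (fun k => b + σ * k)).foldl (fun a e => a ||| 2 ^ e) 0 := by
    rw [List.foldl_map]
  have hpw : ((List.range m).map (fun k => b + σ * k)).Pairwise (· < ·) :=
    List.Pairwise.map _ (fun {x y} (h : x < y) =>
      Nat.add_lt_add_left (Nat.mul_lt_mul_of_pos_left h hσ) b) (List.pairwise_lt_range)
  rw [hmap, pvFoldBor _ hpw, List.map_map, pvSumRange, Finset.mul_sum]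
  congr 1; funext k
  rw [Function.comp_apply, pow_add, pow_mul]

-- descending arithmetic exponents
theorem pvDesc (b σ m : Nat) (hσ : 0 < σ) :
    (List.range m).foldl (fun a k => a ||| 2 ^ (b + σ * (m - 1 - k))) 0
      = 2 ^ b * ∑ k ∈ Finset.range m, (2 ^ σ) ^ k := by
  induction m generalizing b with
  | zero => simp
  | succ m ih =>
      rw [List.range_succ, List.foldl_append, List.foldl_cons, List.foldl_nil]
      have hcongr : (List.range m).foldl (fun a k => a ||| 2 ^ (b + σ * (m + 1 - 1 - k))) 0
          = (List.range m).foldl (fun a k => a ||| 2 ^ ((b + σ) + σ * (m - 1 - k))) 0 := by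
        apply List.foldl_ext
        intro a k hk
        have hk' : k < m := List.mem_range.1 hk
        have h2 : b + σ * (m + 1 - 1 - k) = (b + σ) + σ * (m - 1 - k) := by
          have h3 : m + 1 - 1 - k = (m - 1 - k) + 1 := by omega
          rw [h3]; ring
        rw [h2]
      rw [hcongr, ih (b + σ)]
      have happ : m + 1 - 1 - m = 0 := by omega
      rw [happ, Nat.mul_zero, Nat.add_zero]
      rw [pvLorDisj (b + σ) _ _ ⟨∑ k ∈ Finset.range m, (2 ^ σ) ^ k, rfl⟩
        (by have := Nat.pow_lt_pow_right (a := 2) (by norm_num) (show b < b + σ by omega); omega)]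
      rw [Finset.sum_range_succ', Nat.mul_add, Finset.mul_sum, Finset.mul_sum, pow_zero,
        Nat.mul_one]
      congr 1
      exact Finset.sum_congr rfl (fun x _ => by rw [pow_succ, pow_add]; ring)

-- lift the Int-level loop body of port A to the Nat-level fold
theorem pvFoldIntNat {α : Type} (l : List α) (E : α → Nat) (a : Nat) :
    l.foldl (fun (acc : Int) x => PySem.Int.bor acc ((1 : Int) <<< E x)) (a : Int)
      = ((l.foldl (fun acc x => acc ||| 2 ^ E x) a : Nat) : Int) := by
  induction l generalizing a with
  | nil => simp
  | cons x l ih =>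
      rw [List.foldl_cons, List.foldl_cons]
      have h1 : (1 : Int) <<< E x = ((2 ^ E x : Nat) : Int) := by
        simp [Int.shiftLeft_eq]
      rw [h1, PySem.Int.bor_natCast, ih]


theorem pvFoldIntNat0 {α : Type} (l : List α) (E : α → Nat) :
    l.foldl (fun (acc : Int) x => PySem.Int.bor acc ((1 : Int) <<< E x)) 0
      = ((l.foldl (fun acc x => acc ||| 2 ^ E x) 0 : Nat) : Int) := by
  simpa using pvFoldIntNat l E 0

theorem pvCastSum (b m σ : Nat) :
    ((2 ^ b * ∑ k ∈ Finset.range m, (2 ^ σ) ^ k : Nat) : Int)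
      = (2 : Int) ^ b * ∑ k ∈ Finset.range m, ((2 : Int) ^ σ) ^ k := by
  push_cast
  ring

-- rank sweep, ascending
theorem pvRankAsc (f : Int) (m : Nat) (hf : 0 ≤ f) :
    (List.range m).foldl
        (fun (acc : Int) (k : Nat) => PySem.Int.bor acc ((1 : Int) <<< (f + (k : Int)).toNat)) 0
      = (((1 : Int) <<< m) - 1) <<< f.toNat := by
  have hext : (List.range m).foldl
        (fun (acc : Int) (k : Nat) => PySem.Int.bor acc ((1 : Int) <<< (f + (k : Int)).toNat)) 0
      = (List.range m).foldl
        (fun (acc : Int) (k : Nat) => PySem.Int.bor acc ((1 : Int) <<< (f.toNat + 1 * k))) 0 := by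
    apply List.foldl_ext
    intro a k hk
    have : (f + (k : Int)).toNat = f.toNat + 1 * k := by omega
    rw [this]
  rw [hext, pvFoldIntNat0 (List.range m) (fun k => f.toNat + 1 * k)]
  rw [pvAsc f.toNat 1 m one_pos]
  have hsum : ∑ k ∈ Finset.range m, ((2:Nat) ^ 1) ^ k = 2 ^ m - 1 := by
    simpa [pow_one] using pvGeomTwo m
  rw [hsum, Int.shiftLeft_eq, Int.shiftLeft_eq]
  have h1 : (1 : Nat) ≤ 2 ^ m := Nat.one_le_two_pow
  push_cast [h1]
  ring

-- rank sweep, descending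
theorem pvRankDesc (f : Int) (m : Nat) (hb : 0 ≤ f - ((m : Int) - 1)) :
    (List.range m).foldl
        (fun (acc : Int) (k : Nat) => PySem.Int.bor acc ((1 : Int) <<< (f - (k : Int)).toNat)) 0
      = (((1 : Int) <<< m) - 1) <<< (f - ((m : Int) - 1)).toNat := by
  have hext : (List.range m).foldl
        (fun (acc : Int) (k : Nat) => PySem.Int.bor acc ((1 : Int) <<< (f - (k : Int)).toNat)) 0
      = (List.range m).foldl
        (fun (acc : Int) (k : Nat) =>
          PySem.Int.bor acc ((1 : Int) <<< ((f - ((m : Int) - 1)).toNat + 1 * (m - 1 - k)))) 0 := by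
    apply List.foldl_ext
    intro a k hk
    have hk' : k < m := List.mem_range.1 hk
    have : (f - (k : Int)).toNat = (f - ((m : Int) - 1)).toNat + 1 * (m - 1 - k) := by omega
    rw [this]
  rw [hext, pvFoldIntNat0 (List.range m) (fun k => (f - ((m : Int) - 1)).toNat + 1 * (m - 1 - k)),
    pvDesc _ 1 m one_pos]
  have hsum : ∑ k ∈ Finset.range m, ((2:Nat) ^ 1) ^ k = 2 ^ m - 1 := by
    simpa [pow_one] using pvGeomTwo m
  rw [hsum, Int.shiftLeft_eq, Int.shiftLeft_eq]
  have h1 : (1 : Nat) ≤ 2 ^ m := Nat.one_le_two_pow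
  push_cast [h1]
  ring

-- the geometric-series constant of B's file branch
theorem pvFileConst (m : Nat) :
    PySem.Int.floordiv (((1 : Int) <<< (8 * m)) - 1) 255
      = ∑ k ∈ Finset.range m, ((2 : Int) ^ 8) ^ k := by
  have hgeom : (∑ k ∈ Finset.range m, ((2 : Int) ^ 8) ^ k) * 255 = (1 : Int) <<< (8 * m) - 1 := by
    have := geom_sum_mul ((2 : Int) ^ 8) m
    norm_num at this ⊢
    rw [Int.shiftLeft_eq, pow_mul]
    norm_num
    exact this
  rw [← hgeom, PySem.Int.floordiv_eq_ediv_of_pos (by norm_num : (0:Int) < 255),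
    Int.mul_ediv_cancel _ (by norm_num : (255:Int) ≠ 0)]

-- file sweep, ascending
theorem pvFileAsc (f : Int) (m : Nat) (hf : 0 ≤ f) :
    (List.range m).foldl
        (fun (acc : Int) (k : Nat) => PySem.Int.bor acc ((1 : Int) <<< (f + 8 * (k : Int)).toNat)) 0
      = PySem.Int.floordiv (((1 : Int) <<< (8 * m)) - 1) 255 <<< f.toNat := by
  have hext : (List.range m).foldl
        (fun (acc : Int) (k : Nat) => PySem.Int.bor acc ((1 : Int) <<< (f + 8 * (k : Int)).toNat)) 0
      = (List.range m).foldl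
        (fun (acc : Int) (k : Nat) => PySem.Int.bor acc ((1 : Int) <<< (f.toNat + 8 * k))) 0 := by
    apply List.foldl_ext
    intro a k hk
    have : (f + 8 * (k : Int)).toNat = f.toNat + 8 * k := by omega
    rw [this]
  rw [hext, pvFoldIntNat0 (List.range m) (fun k => f.toNat + 8 * k),
    pvAsc f.toNat 8 m (by norm_num), pvFileConst, pvCastSum, Int.shiftLeft_eq]
  ring

-- file sweep, descending
theorem pvFileDesc (f : Int) (m : Nat) (hb : 0 ≤ f - 8 * ((m : Int) - 1)) :
    (List.range m).foldl
        (fun (acc : Int) (k : Nat) => PySem.Int.bor acc ((1 : Int) <<< (f - 8 * (k : Int)).toNat)) 0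
      = PySem.Int.floordiv (((1 : Int) <<< (8 * m)) - 1) 255 <<< (f - 8 * ((m : Int) - 1)).toNat := by
  have hext : (List.range m).foldl
        (fun (acc : Int) (k : Nat) => PySem.Int.bor acc ((1 : Int) <<< (f - 8 * (k : Int)).toNat)) 0
      = (List.range m).foldl
        (fun (acc : Int) (k : Nat) =>
          PySem.Int.bor acc ((1 : Int) <<< ((f - 8 * ((m : Int) - 1)).toNat + 8 * (m - 1 - k)))) 0 := by
    apply List.foldl_ext
    intro a k hk
    have hk' : k < m := List.mem_range.1 hk
    have : (f - 8 * (k : Int)).toNat = (f - 8 * ((m : Int) - 1)).toNat + 8 * (m - 1 - k) := by omega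
    rw [this]
  rw [hext, pvFoldIntNat0 (List.range m)
      (fun k => (f - 8 * ((m : Int) - 1)).toNat + 8 * (m - 1 - k)),
    pvDesc _ 8 m (by norm_num), pvFileConst, pvCastSum, Int.shiftLeft_eq]
  ring

theorem pvMain (from_sq to_sq : Int) (hpre : Pre_build_between_line from_sq to_sq) :
    build_between_line from_sq to_sq = build_between_line_alt from_sq to_sq := by
  unfold Pre_build_between_line at hpre
  unfold build_between_line build_between_line_alt
  dsimp only at hpre ⊢
  have hfd : PySem.Int.floordiv from_sq 8 * 8 + PySem.Int.mod from_sq 8 = from_sq :=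
    PySem.Int.floordiv_mul_add_mod from_sq 8
  have htd : PySem.Int.floordiv to_sq 8 * 8 + PySem.Int.mod to_sq 8 = to_sq :=
    PySem.Int.floordiv_mul_add_mod to_sq 8
  have hm : PySem.Int.mod from_sq 8 = from_sq % 8 :=
    PySem.Int.mod_eq_emod_of_pos (by norm_num)
  have hm' : PySem.Int.mod to_sq 8 = to_sq % 8 :=
    PySem.Int.mod_eq_emod_of_pos (by norm_num)
  have hr8 : 0 ≤ PySem.Int.mod from_sq 8 ∧ PySem.Int.mod from_sq 8 < 8 := by
    rw [hm]; exact ⟨Int.emod_nonneg _ (by norm_num), Int.emod_lt_of_pos _ (by norm_num)⟩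
  have hr8' : 0 ≤ PySem.Int.mod to_sq 8 ∧ PySem.Int.mod to_sq 8 < 8 := by
    rw [hm']; exact ⟨Int.emod_nonneg _ (by norm_num), Int.emod_lt_of_pos _ (by norm_num)⟩
  set q := PySem.Int.floordiv from_sq 8 with hqdef
  set r := PySem.Int.mod from_sq 8 with hrdef
  set q' := PySem.Int.floordiv to_sq 8 with hq'def
  set r' := PySem.Int.mod to_sq 8 with hr'def
  by_cases hdr : q' - q = 0
  · by_cases hdc : r' - r = 0
    · -- same square: empty sweep on both sides
      simp only [hdr, hdc]
      norm_num
    · -- rank sweep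
      by_cases hpos : r' - r > 0
      · simp only [hdr]
        norm_num
        have hlt : r < r' := by omega
        rw [abs_of_pos hpos, if_neg hdc, if_pos hlt, PySem.List.pyRange_one, sub_zero,
          List.foldl_map]
        have hext : (List.range (r' - r).toNat).foldl
              (fun (line : Int) (k : Nat) =>
                PySem.Int.bor line
                  ((1:Int) <<< (q * 8 + (r + if r < r' then (0:Int) + (k:Int) else -((0:Int) + (k:Int)))).toNat)) 0
            = (List.range (r' - r).toNat).foldl
              (fun (line : Int) (k : Nat) =>
                PySem.Int.bor line ((1:Int) <<< (from_sq + (k : Int)).toNat)) 0 := by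
          apply List.foldl_ext
          intro a k _
          rw [if_pos hlt]
          have : (q * 8 + (r + ((0:Int) + (k:Int)))).toNat = (from_sq + (k:Int)).toNat := by omega
          rw [this]
        rw [hext, pvRankAsc from_sq _ (by omega)]
      · -- rank sweep, descending
        simp only [hdr]
        norm_num
        have hneg : r' - r < 0 := by omega
        have hnlt : ¬ r < r' := by omega
        rw [abs_of_neg hneg, if_neg hdc, if_neg hnlt, PySem.List.pyRange_one, sub_zero,
          List.foldl_map]
        have hext : (List.range (-(r' - r)).toNat).foldl
              (fun (line : Int) (k : Nat) =>
                PySem.Int.bor line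
                  ((1:Int) <<< (q * 8 + (r + if r < r' then (0:Int) + (k:Int) else -((0:Int) + (k:Int)))).toNat)) 0
            = (List.range (-(r' - r)).toNat).foldl
              (fun (line : Int) (k : Nat) =>
                PySem.Int.bor line ((1:Int) <<< (from_sq - (k : Int)).toNat)) 0 := by
          apply List.foldl_ext
          intro a k _
          rw [if_neg hnlt]
          have : (q * 8 + (r + -((0:Int) + (k:Int)))).toNat = (from_sq - (k:Int)).toNat := by omega
          rw [this]
        rw [hext, pvRankDesc from_sq _ (by omega)]
        congr 1
        omega
  · by_cases hdc : r' - r = 0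
    · -- file sweep
      by_cases hpos : q' - q > 0
      · simp only [hdc, hdr]
        norm_num
        have hlt : q < q' := by omega
        rw [abs_of_pos hpos, if_neg hdr, if_pos hlt, PySem.List.pyRange_one, sub_zero,
          List.foldl_map]
        have hext : (List.range (q' - q).toNat).foldl
              (fun (line : Int) (k : Nat) =>
                PySem.Int.bor line
                  ((1:Int) <<< ((q + (if q < q' then (0:Int) + (k:Int) else -((0:Int) + (k:Int)))) * 8 + r).toNat)) 0
            = (List.range (q' - q).toNat).foldl
              (fun (line : Int) (k : Nat) =>
                PySem.Int.bor line ((1:Int) <<< (from_sq + 8 * (k : Int)).toNat)) 0 := by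
          apply List.foldl_ext
          intro a k _
          rw [if_pos hlt]
          have : ((q + ((0:Int) + (k:Int))) * 8 + r).toNat = (from_sq + 8 * (k:Int)).toNat := by omega
          rw [this]
        rw [hext, pvFileAsc from_sq _ (by omega)]
        have h8m : (8 * (q' - q)).toNat = 8 * (q' - q).toNat := by omega
        rw [h8m, PySem.Int.floordiv_eq_ediv_of_pos (by norm_num : (0:Int) < 255)]
      · -- file sweep, descending
        simp only [hdc, hdr]
        norm_num
        have hneg : q' - q < 0 := by omega
        have hnlt : ¬ q < q' := by omega
        rw [abs_of_neg hneg, if_neg hdr, if_neg hnlt, PySem.List.pyRange_one, sub_zero,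
          List.foldl_map]
        have hext : (List.range (-(q' - q)).toNat).foldl
              (fun (line : Int) (k : Nat) =>
                PySem.Int.bor line
                  ((1:Int) <<< ((q + (if q < q' then (0:Int) + (k:Int) else -((0:Int) + (k:Int)))) * 8 + r).toNat)) 0
            = (List.range (-(q' - q)).toNat).foldl
              (fun (line : Int) (k : Nat) =>
                PySem.Int.bor line ((1:Int) <<< (from_sq - 8 * (k : Int)).toNat)) 0 := by
          apply List.foldl_ext
          intro a k _
          rw [if_neg hnlt]
          have : ((q + -((0:Int) + (k:Int))) * 8 + r).toNat = (from_sq - 8 * (k:Int)).toNat := by omega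
          rw [this]
        rw [hext, pvFileDesc from_sq _ (by omega)]
        have h8m : (8 * -(q' - q)).toNat = 8 * (-(q' - q)).toNat := by omega
        rw [h8m, PySem.Int.floordiv_eq_ediv_of_pos (by norm_num : (0:Int) < 255)]
        congr 1
        omega
    · -- not aligned: both return 0
      rw [if_pos (⟨hdr, hdc⟩ : _ ∧ _), if_pos (⟨hdr, hdc⟩ : _ ∧ _)]

-- ===== VERDICT (by name: the statement is the Claim_ definition above) =====
theorem build_between_line_spec : Claim_equal_build_between_line := by
  intro from_sq to_sq _ hpre
  unfold Spec_build_between_line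
  exact pvMain from_sq to_sq hpre
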